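-- pv_equiv track=rewrite | github.com/NuclearOreo/Project-Euler | TruncatablePrimes.py | leftCut
-- ===== SOURCE A (Python) =====
-- def fermat(n):
-- 	if n == 2:
-- 		return True
-- 	if not n & 1:
-- 		return False
-- 	return pow(2, n-1, n) == 1
--
-- def leftCut(n):
--     l = []
--     nn = n
--     if n < 10:
--         return False
--     while nn > 0:
--         w = list(str(nn))
--         w[0] = '0'
--         nn = int("".join(w))
--         l.append(nn)
--
--     for x in range(0,len(l)-1):
--         if fermat(l[x]) == False:
--             return False
--
--     return True
-- ===== SOURCE B (Python) =====
-- def fermat(n):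
-- 	if n == 2:
-- 		return True
-- 	if not n & 1:
-- 		return False
-- 	return pow(2, n-1, n) == 1
--
-- def leftCut(n):
--     # Arithmetic one-pass re-implementation: check every nonzero left-truncation
--     # suffix n % 10**k directly, no string round-trips and no intermediate list.
--     if n < 10:
--         return False
--     p = 10
--     while p <= n:
--         suf = n % p
--         if suf and not fermat(suf):
--             return False
--         p *= 10
--     return True
-- ===== Notes on version B (the rewrite author's own statement) =====
-- stated objective: alternative
-- what changed: A strips the leading digit by re-stringifying the running value and collecting all truncations in a list before a second checking pass; B checks each nonzero suffix n % 10**k directly in one arithmetic loop over powers of ten, with no string round-trips and no intermediate list.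
import Mathlib
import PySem

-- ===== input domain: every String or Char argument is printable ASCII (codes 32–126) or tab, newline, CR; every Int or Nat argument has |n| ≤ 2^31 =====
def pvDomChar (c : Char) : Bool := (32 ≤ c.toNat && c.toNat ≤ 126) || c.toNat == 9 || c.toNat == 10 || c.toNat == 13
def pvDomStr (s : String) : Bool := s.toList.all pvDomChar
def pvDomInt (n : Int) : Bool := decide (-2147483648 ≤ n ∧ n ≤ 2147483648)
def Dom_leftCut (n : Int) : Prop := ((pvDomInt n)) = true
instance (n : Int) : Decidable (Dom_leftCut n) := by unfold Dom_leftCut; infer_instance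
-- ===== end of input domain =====

-- B re-implements left-truncatable Fermat-pseudoprime checking arithmetically (suffixes n % 10^k in one
-- pass) instead of A's string-rewriting loop plus second checking pass; return values are identical.


-- ===== PORT A =====
-- fermat(n); pow(2, n-1, n) is PySem.Int.powMod.  Both programs call fermat only with arguments ≥ 1,
-- where the Nat exponent (n-1).toNat is exact.
def fermatP (n : Int) : Bool :=
  if n = 2 then true
  else if PySem.Int.band n 1 = 0 then false
  else decide (PySem.Int.powMod 2 (n - 1).toNat n = 1)

-- int("".join(w)): here int() is only ever applied to the nonempty all-digit string obtained from
-- str(nn) by replacing its first character with '0'.  digitsInt? is exact w.r.t. Python int() on such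
-- strings (value of the decimal digits, leading zeros allowed; none elsewhere, like ValueError).
-- (It is ported by hand because the digit-parsing core of PySem.Int.ofChars? is a private definition
-- that proofs cannot reason about symbolically.)
def digitsInt? (cs : List Char) : Option Int :=
  if cs ≠ [] ∧ cs.all Char.isDigit = true
  then some (cs.foldl (fun a c => a * 10 + ((c.toNat : Int) - 48)) 0)
  else none

-- w = list(str(nn)); w[0] = '0'; int("".join(w))   (the .getD 0 default is unreachable: for nn > 0 the
-- string is nonempty and all digits, so digitsInt? returns some value)
def stepA (nn : Int) : Int :=
  (digitsInt? (PySem.List.pySetD (PySem.Int.toChars nn) 0 '0')).getD 0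

-- decimal digit characters of m, big-endian; proved equal to Nat.toDigits 10 m (hence to str(m)).
-- This and the lemmas up to stepA_toNat_lt are needed by the port's termination proof.
def digs (m : Nat) : List Char :=
  if h : m < 10 then [Nat.digitChar m]
  else digs (m / 10) ++ [Nat.digitChar (m % 10)]
termination_by m
decreasing_by exact Nat.div_lt_self (by omega) (by omega)

lemma toDigitsCore_eq_digs : ∀ (f m : Nat) (acc : List Char), m < f →
    Nat.toDigitsCore 10 f m acc = digs m ++ acc := by
  intro f
  induction f with
  | zero => omega
  | succ f ih =>
    intro m acc hm
    rw [Nat.toDigitsCore]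
    by_cases h10 : m < 10
    · have h0 : m / 10 = 0 := Nat.div_eq_of_lt h10
      simp [h0, digs, h10, Nat.mod_eq_of_lt h10]
    · have hne : m / 10 ≠ 0 := by
        have := Nat.div_pos (by omega : 10 ≤ m) (by omega : 0 < 10); omega
      have hlt : m / 10 < f := lt_of_lt_of_le (Nat.div_lt_self (by omega) (by omega)) (by omega)
      simp only [hne, ite_false]
      rw [ih (m / 10) _ hlt]
      conv_rhs => rw [digs, dif_neg h10]
      simp

lemma toChars_natCast (m : Nat) : PySem.Int.toChars (m : Int) = digs m := by
  rw [PySem.Int.toChars]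
  rw [if_neg (by omega)]
  simp only [Int.toNat_natCast]
  rw [Nat.toDigits]
  exact toDigitsCore_eq_digs (m + 1) m [] (by omega) |>.trans (by simp)

lemma digs_ne_nil (m : Nat) : digs m ≠ [] := by
  rw [digs]; split <;> simp

lemma digitChar_isDigit {k : Nat} (h : k < 10) : (Nat.digitChar k).isDigit = true := by
  interval_cases k <;> decide

lemma digitChar_val {k : Nat} (h : k < 10) : ((Nat.digitChar k).toNat : Int) - 48 = (k : Int) := by
  interval_cases k <;> decide

lemma digs_digits (m : Nat) : ∀ c ∈ digs m, c.isDigit = true := by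
  induction m using digs.induct with
  | case1 m h => rw [digs, dif_pos h]; simpa using digitChar_isDigit h
  | case2 m h ih =>
    rw [digs, dif_neg h]
    intro c hc
    rcases List.mem_append.mp hc with h1 | h1
    · exact ih c h1
    · simp at h1; subst h1; exact digitChar_isDigit (Nat.mod_lt _ (by omega))

lemma digit_bounds {c : Char} (hc : c.isDigit = true) : 48 ≤ c.toNat ∧ c.toNat ≤ 57 := by
  simp [Char.isDigit] at hc
  exact hc

lemma foldl_shift (cs : List Char) : ∀ a : Int,
    cs.foldl (fun a c => a * 10 + ((c.toNat : Int) - 48)) a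
      = a * 10 ^ cs.length + cs.foldl (fun a c => a * 10 + ((c.toNat : Int) - 48)) 0 := by
  induction cs with
  | nil => intro a; simp
  | cons c cs ih =>
    intro a
    simp only [List.foldl_cons, List.length_cons]
    rw [ih (a * 10 + ((c.toNat : Int) - 48)), ih (0 * 10 + ((c.toNat : Int) - 48))]
    ring

lemma foldl_bounds (cs : List Char) (h : ∀ c ∈ cs, c.isDigit = true) :
    0 ≤ cs.foldl (fun a c => a * 10 + ((c.toNat : Int) - 48)) 0 ∧
      cs.foldl (fun a c => a * 10 + ((c.toNat : Int) - 48)) 0 < 10 ^ cs.length := by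
  induction cs with
  | nil => simp
  | cons c cs ih =>
    obtain ⟨ih1, ih2⟩ := ih (fun c' hc' => h c' (List.mem_cons_of_mem _ hc'))
    have hd := digit_bounds (h c (List.mem_cons_self))
    simp only [List.foldl_cons, List.length_cons]
    rw [foldl_shift]
    have hP : (0:Int) < 10 ^ cs.length := by positivity
    constructor
    · have := mul_nonneg (by omega : (0:Int) ≤ 0 * 10 + ((c.toNat:Int) - 48)) (le_of_lt hP)
      omega
    · have h9 : (0 * 10 + ((c.toNat:Int) - 48)) * 10 ^ cs.length ≤ 9 * 10 ^ cs.length :=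
        mul_le_mul_of_nonneg_right (by omega) (le_of_lt hP)
      have h10 : (10:Int) ^ (cs.length + 1) = 10 * 10 ^ cs.length := by ring
      rw [h10]
      omega

lemma digs_val (m : Nat) :
    (digs m).foldl (fun a c => a * 10 + ((c.toNat : Int) - 48)) 0 = (m : Int) := by
  induction m using digs.induct with
  | case1 m h => simp [digs, h, digitChar_val h]
  | case2 m h ih =>
    rw [digs, dif_neg h]
    rw [List.foldl_append]
    rw [ih]
    simp [digitChar_val (Nat.mod_lt _ (by omega : (0:Nat) < 10))]
    have hsplit : ((m / 10 : Nat) : Int) * 10 + ((m % 10 : Nat) : Int) = (m : Int) := by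
      push_cast
      omega
    omega

lemma digs_lb (m : Nat) (h : 0 < m) : 10 ^ ((digs m).length - 1) ≤ m := by
  induction m using digs.induct with
  | case1 m hlt => rw [digs, dif_pos hlt]; simpa using h
  | case2 m hge ih =>
    rw [digs, dif_neg hge]
    have h1 : 1 ≤ (digs (m / 10)).length := List.length_pos_of_ne_nil (digs_ne_nil _)
    have ihh := ih (Nat.div_pos (by omega) (by omega))
    simp only [List.length_append, List.length_cons, List.length_nil]
    have he : (digs (m / 10)).length + (0 + 1) - 1 = ((digs (m / 10)).length - 1) + 1 := by omega
    rw [he, pow_succ]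
    have hmm := Nat.div_add_mod m 10
    have h2 : 10 ^ ((digs (m / 10)).length - 1) * 10 ≤ (m / 10) * 10 :=
      Nat.mul_le_mul_right _ ihh
    omega

lemma stepA_eq (nn : Int) (h : 0 < nn) :
    stepA nn = ((nn.toNat % 10 ^ ((digs nn.toNat).length - 1) : Nat) : Int) := by
  set m := nn.toNat with hm
  have hnn : (m : Int) = nn := Int.toNat_of_nonneg (by omega)
  have hm0 : 0 < m := by omega
  have hd : PySem.Int.toChars nn = digs m := by rw [← hnn, toChars_natCast]
  obtain ⟨c, t, hct⟩ := List.exists_cons_of_ne_nil (digs_ne_nil m)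
  unfold stepA
  rw [hd, hct]
  have hset : PySem.List.pySetD (c :: t) (0 : Int) '0' = '0' :: t := by
    rw [PySem.List.pySetD_of_nonneg (c :: t) '0' (by omega : (0:Int) ≤ 0)]
    simp
  rw [hset]
  have hdigall : ∀ c' ∈ c :: t, c'.isDigit = true := by rw [← hct]; exact digs_digits m
  have hcond : ('0' :: t ≠ [] ∧ ('0' :: t).all Char.isDigit = true) := by
    refine ⟨by simp, ?_⟩
    simp only [List.all_cons, Bool.and_eq_true]
    exact ⟨by decide, List.all_eq_true.mpr (fun c' hc' => hdigall c' (List.mem_cons_of_mem _ hc'))⟩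
  rw [digitsInt?, if_pos hcond]
  simp only [Option.getD_some]
  have hval : (m : Int) = (c :: t).foldl (fun a c => a * 10 + ((c.toNat : Int) - 48)) 0 := by
    rw [← hct, digs_val]
  simp only [List.foldl_cons] at hval ⊢
  have h048 : ((('0' : Char).toNat : Int) - 48) = 0 := by decide
  rw [h048]
  have hz : (0:Int) * 10 + 0 = 0 := by ring
  rw [hz]
  rw [foldl_shift t] at hval
  set V := t.foldl (fun a c => a * 10 + ((c.toNat : Int) - 48)) 0 with hV
  obtain ⟨hV0, hVlt⟩ := foldl_bounds t (fun c' hc' => hdigall c' (List.mem_cons_of_mem _ hc'))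
  simp only [List.length_cons, Nat.add_sub_cancel]
  have hcast : ((m % 10 ^ t.length : Nat) : Int) = (m : Int) % (10:Int) ^ t.length := by
    push_cast
    rfl
  rw [hcast, hval]
  have harr : (0 * 10 + ((c.toNat:Int) - 48)) * 10 ^ t.length + V
      = V + ((c.toNat:Int) - 48) * 10 ^ t.length := by ring
  rw [harr]
  rw [Int.add_mul_emod_self_right]
  exact (Int.emod_eq_of_lt hV0 hVlt).symm

lemma mod_digs_lt (m : Nat) (h : 0 < m) : m % 10 ^ ((digs m).length - 1) < m :=
  lt_of_lt_of_le (Nat.mod_lt _ (Nat.pow_pos (by omega))) (digs_lb m h)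

lemma stepA_toNat_lt (nn : Int) (h : 0 < nn) : (stepA nn).toNat < nn.toNat := by
  rw [stepA_eq nn h]
  rw [Int.toNat_natCast]
  exact mod_digs_lt _ (by omega)

-- while nn > 0: nn = int(...); l.append(nn)
def leftCutLoop (nn : Int) (l : List Int) : List Int :=
  if h : 0 < nn then leftCutLoop (stepA nn) (l ++ [stepA nn]) else l
termination_by nn.toNat
decreasing_by exact stepA_toNat_lt nn h

def leftCut (n : Int) : Bool :=
  if n < 10 then false
  else
    let l := leftCutLoop n []
    -- for x in range(0, len(l)-1): if fermat(l[x]) == False: return False;  return True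
    (PySem.List.pyRange 0 (PySem.List.len l - 1) 1).all (fun x => fermatP (PySem.List.pyGetD l x 0))

-- ===== PORT B =====
-- while p <= n: suf = n % p; if suf and not fermat(suf): return False; p *= 10;  return True
-- (fuel is only a totality guard: p is multiplied tenfold each iteration starting from 10, so far
-- fewer than n.toNat iterations ever happen; the proof shows the fuel is never exhausted)
def leftCutLoopB (fuel : Nat) (n p : Int) : Bool :=
  match fuel with
  | 0 => true
  | f + 1 =>
    if p ≤ n then
      let suf := PySem.Int.mod n p
      if suf ≠ 0 ∧ fermatP suf = false then false
      else leftCutLoopB f n (p * 10)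
    else true

def leftCut_alt (n : Int) : Bool :=
  if n < 10 then false else leftCutLoopB n.toNat n 10

-- ===== PRECONDITION & SPEC =====
def Spec_leftCut (n : Int) (out : Bool) : Prop := out = leftCut_alt n
instance (n : Int) (out : Bool) : Decidable (Spec_leftCut n out) := by unfold Spec_leftCut; infer_instance

-- ===== CLAIM (what is proved, stated in full; the proofs are below) =====
def Claim_equal_leftCut : Prop := ∀ (n : Int), Dom_leftCut n → Spec_leftCut n (leftCut n)

-- ===== LEMMAS AND PROOFS =====

-- the chain of values A's while-loop appends to l, in arithmetic form
def chain (m : Nat) : List Int :=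
  if h : m = 0 then []
  else ((m % 10 ^ ((digs m).length - 1) : Nat) : Int) :: chain (m % 10 ^ ((digs m).length - 1))
termination_by m
decreasing_by exact mod_digs_lt m (by omega)

-- the property both programs decide, for m = n.toNat ≥ 10
def Qprop (m : Nat) : Prop :=
  ∀ j : Nat, 1 ≤ j → 10 ^ j ≤ m → (m % 10 ^ j = 0 ∨ fermatP ((m % 10 ^ j : Nat) : Int) = true)

lemma digs_ub (m : Nat) : m < 10 ^ (digs m).length := by
  induction m using digs.induct with
  | case1 m h => rw [digs, dif_pos h]; simpa using h
  | case2 m h ih =>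
    rw [digs, dif_neg h]
    simp only [List.length_append, List.length_cons, List.length_nil]
    have hp : 10 ^ ((digs (m / 10)).length + (0 + 1)) = 10 ^ (digs (m / 10)).length * 10 := by ring
    rw [hp]
    omega

lemma loopA_append (nn : Int) (l : List Int) :
    leftCutLoop nn l = l ++ leftCutLoop nn [] := by
  generalize hk : nn.toNat = k
  induction k using Nat.strong_induction_on generalizing nn l with
  | _ k ih =>
    rw [leftCutLoop]
    conv_rhs => rw [leftCutLoop]
    by_cases hp : 0 < nn
    · simp only [dif_pos hp]
      rw [ih (stepA nn).toNat (by rw [← hk]; exact stepA_toNat_lt nn hp) _ (l ++ [stepA nn]) rfl,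
          ih (stepA nn).toNat (by rw [← hk]; exact stepA_toNat_lt nn hp) _ ([] ++ [stepA nn]) rfl]
      simp
    · simp [dif_neg hp]

lemma loopA_chain (nn : Int) : 0 ≤ nn → leftCutLoop nn [] = chain nn.toNat := by
  generalize hk : nn.toNat = k
  induction k using Nat.strong_induction_on generalizing nn with
  | _ k ih =>
    subst hk
    intro hnn
    rw [leftCutLoop]
    by_cases hp : 0 < nn
    · simp only [dif_pos hp]
      rw [loopA_append]
      have hstep := stepA_eq nn hp
      have hlt := stepA_toNat_lt nn hp
      have hs0 : 0 ≤ stepA nn := by rw [hstep]; positivity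
      rw [ih (stepA nn).toNat hlt _ rfl hs0]
      conv_rhs => rw [chain]
      rw [dif_neg (by omega : ¬ nn.toNat = 0)]
      have htn : (stepA nn).toNat = nn.toNat % 10 ^ ((digs nn.toNat).length - 1) := by
        rw [hstep, Int.toNat_natCast]
      rw [htn, ← htn]
      simp [Int.toNat_of_nonneg hs0]
    · simp only [dif_neg hp]
      have h0 : nn.toNat = 0 := by omega
      rw [h0, chain]
      simp

lemma chain_ne_nil (m : Nat) (h : 0 < m) : chain m ≠ [] := by
  rw [chain, dif_neg (by omega : ¬ m = 0)]
  simp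

lemma pow_le_iff_lt_len (m j : Nat) (hm : 0 < m) : 10 ^ j ≤ m ↔ j < (digs m).length := by
  constructor
  · intro hj
    have := digs_ub m
    by_contra hcon
    have hge : (digs m).length ≤ j := by omega
    have := Nat.pow_le_pow_right (by omega : 1 ≤ 10) hge
    omega
  · intro hj
    have hlb := digs_lb m hm
    have hle : j ≤ (digs m).length - 1 := by omega
    calc 10 ^ j ≤ 10 ^ ((digs m).length - 1) := Nat.pow_le_pow_right (by omega) hle
      _ ≤ m := hlb

lemma dropLast_chain (m : Nat) (hv : m % 10 ^ ((digs m).length - 1) ≠ 0) (hm : ¬ m = 0) :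
    (chain m).dropLast
      = ((m % 10 ^ ((digs m).length - 1) : Nat) : Int) :: (chain (m % 10 ^ ((digs m).length - 1))).dropLast := by
  rw [chain, dif_neg hm]
  cases hc : chain (m % 10 ^ ((digs m).length - 1)) with
  | nil => exact absurd hc (chain_ne_nil _ (Nat.pos_of_ne_zero hv))
  | cons y ys => simp

lemma chain_all_iff (m : Nat) (hm : 0 < m) :
    ((chain m).dropLast.all fermatP = true) ↔ Qprop m := by
  induction m using Nat.strong_induction_on with
  | _ m ih =>
    set L := (digs m).length with hL
    have hL1 : 1 ≤ L := List.length_pos_of_ne_nil (digs_ne_nil m)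
    set v := m % 10 ^ (L - 1) with hv
    have hvm : v < m := mod_digs_lt m hm
    have hvlt : v < 10 ^ (L - 1) := Nat.mod_lt _ (Nat.pow_pos (by omega))
    have hmod : ∀ j, j ≤ L - 1 → m % 10 ^ j = v % 10 ^ j := by
      intro j hj
      rw [hv, Nat.mod_mod_of_dvd _ (pow_dvd_pow 10 hj)]
    by_cases hv0 : v = 0
    · -- the loop strips to 0 at once: nothing is checked, and every admissible suffix is 0
      have hch0 : chain 0 = [] := by rw [chain]; simp
      rw [chain, dif_neg (by omega : ¬ m = 0), ← hv, hv0, hch0]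
      simp only [List.dropLast, List.all_nil, true_iff]
      intro j hj1 hjm
      left
      have hjL : j < L := (pow_le_iff_lt_len m j hm).mp hjm
      rw [hmod j (by omega), hv0]
      simp
    · have hvpos : 0 < v := Nat.pos_of_ne_zero hv0
      have hL2 : 2 ≤ L := by
        by_contra hcon
        have : L = 1 := by omega
        rw [this] at hvlt
        simp at hvlt
        omega
      set Lv := (digs v).length with hLv
      have hLv1 : 1 ≤ Lv := List.length_pos_of_ne_nil (digs_ne_nil v)
      have hLvle : Lv ≤ L - 1 := by
        have h1 : 10 ^ (Lv - 1) ≤ v := digs_lb v hvpos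
        have h2 : 10 ^ (Lv - 1) < 10 ^ (L - 1) := by omega
        have h3 : Lv - 1 < L - 1 := by
          by_contra hcon
          have := Nat.pow_le_pow_right (by omega : 1 ≤ 10) (by omega : L - 1 ≤ Lv - 1)
          omega
        omega
      have hvsmall : ∀ j, Lv ≤ j → v % 10 ^ j = v := by
        intro j hj
        exact Nat.mod_eq_of_lt (lt_of_lt_of_le (digs_ub v)
          (Nat.pow_le_pow_right (by omega) hj))
      rw [dropLast_chain m (by rw [← hv]; exact hv0) (by omega)]
      simp only [List.all_cons, Bool.and_eq_true]
      rw [← hv, ih v hvm hvpos]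
      constructor
      · rintro ⟨hferm, hQv⟩ j hj1 hjm
        have hjL : j < L := (pow_le_iff_lt_len m j hm).mp hjm
        rw [hmod j (by omega)]
        by_cases hjv : j < Lv
        · exact hQv j hj1 ((pow_le_iff_lt_len v j hvpos).mpr hjv)
        · rw [hvsmall j (by omega)]
          right
          exact hferm
      · intro hQm
        constructor
        · have := hQm (L - 1) (by omega) (digs_lb m hm)
          rcases this with h0 | hf
          · exact absurd (by rw [hv]; exact h0) hv0
          · rw [← hv] at hf
            exact hf
        · intro j hj1 hjv
          have hjLv : j < Lv := (pow_le_iff_lt_len v j hvpos).mp hjv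
          have hjm : 10 ^ j ≤ m := le_trans hjv (le_of_lt hvm)
          have := hQm j hj1 hjm
          rw [hmod j (by omega)] at this
          exact this

lemma range_all_dropLast (l : List Int) (hl : l ≠ []) :
    ((PySem.List.pyRange 0 (PySem.List.len l - 1) 1).all
        (fun x => fermatP (PySem.List.pyGetD l x 0)) = true)
      ↔ (l.dropLast.all fermatP = true) := by
  have hpos : 0 < l.length := List.length_pos_of_ne_nil hl
  have hdl : l.dropLast.length = l.length - 1 := List.length_dropLast
  have hb : PySem.List.len l - 1 = (l.dropLast.length : Int) := by
    rw [PySem.List.len_eq, hdl]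
    omega
  rw [hb, PySem.List.pyRange_one]
  simp only [Int.sub_zero, Int.toNat_natCast, List.all_map, List.all_eq_true, List.mem_range,
    Function.comp]
  have hget : ∀ (k : Nat) (hk : k < l.dropLast.length),
      PySem.List.pyGetD l ((0 : Int) + (k : Nat)) 0 = l.dropLast[k]'hk := by
    intro k hk
    rw [zero_add, PySem.List.pyGetD_natCast]
    rw [List.getD_eq_getElem l 0 (by omega)]
    exact (List.getElem_dropLast _).symm
  constructor
  · intro hall y hy
    obtain ⟨k, hk, hky⟩ := List.mem_iff_getElem.mp hy
    have h1 := hall k hk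
    rw [hget k hk] at h1
    rw [← hky]
    exact h1
  · intro hall k hk
    rw [hget k hk]
    exact hall _ (List.getElem_mem _)

lemma leftCut_eq (n : Int) (h : ¬ n < 10) :
    (leftCut n = true) ↔ Qprop n.toNat := by
  have hm0 : 0 < n.toNat := by omega
  rw [leftCut, if_neg h, loopA_chain n (by omega : 0 ≤ n)]
  exact (range_all_dropLast (chain n.toNat) (chain_ne_nil _ hm0)).trans (chain_all_iff n.toNat hm0)

lemma loopB_spec : ∀ (fuel k : Nat) (m : Nat), 1 ≤ k → m < 10 ^ (k + fuel) →
    (leftCutLoopB fuel (m : Int) ((10 ^ k : Nat) : Int) = true ↔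
      ∀ j : Nat, k ≤ j → 10 ^ j ≤ m → (m % 10 ^ j = 0 ∨ fermatP ((m % 10 ^ j : Nat) : Int) = true)) := by
  intro fuel
  induction fuel with
  | zero =>
    intro k m hk hfuel
    simp only [leftCutLoopB, true_iff]
    intro j hj hjm
    have := Nat.pow_le_pow_right (by omega : 1 ≤ 10) (by omega : k + 0 ≤ j)
    omega
  | succ f ih =>
    intro k m hk hfuel
    simp only [leftCutLoopB]
    by_cases hpm : 10 ^ k ≤ m
    · rw [if_pos (by exact_mod_cast hpm)]
      have hsuf : PySem.Int.mod (m : Int) ((10 ^ k : Nat) : Int) = ((m % 10 ^ k : Nat) : Int) :=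
        PySem.Int.mod_natCast m (10 ^ k)
      simp only [hsuf]
      by_cases hbad : ((m % 10 ^ k : Nat) : Int) ≠ 0 ∧ fermatP ((m % 10 ^ k : Nat) : Int) = false
      · rw [if_pos hbad]
        constructor
        · intro hcon
          simp at hcon
        · intro hall
          rcases hbad with ⟨h1, h2⟩
          rcases hall k (le_refl k) hpm with h0 | hf
          · exact absurd (by exact_mod_cast h0) h1
          · rw [h2] at hf
            exact absurd hf (by simp)
      · rw [if_neg hbad]
        have hcast : ((10 ^ k : Nat) : Int) * 10 = ((10 ^ (k + 1) : Nat) : Int) := by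
          push_cast
          ring
        rw [hcast, ih (k + 1) m (by omega) (by
          have : k + 1 + f = k + (f + 1) := by omega
          rw [this]
          exact hfuel)]
        constructor
        · intro hrest j hj hjm
          rcases Nat.lt_or_ge k j with hlt | hge
          · exact hrest j (by omega) hjm
          · have hkj : j = k := by omega
            subst hkj
            rcases not_and_or.mp hbad with h1 | h2
            · left
              have : ((m % 10 ^ j : Nat) : Int) = 0 := by
                by_contra hc
                exact h1 hc
              exact_mod_cast this
            · right
              cases hfm : fermatP ((m % 10 ^ j : Nat) : Int) with
              | false => exact absurd hfm h2
              | true => rfl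
        · intro hall j hj hjm
          exact hall j (by omega) hjm
    · rw [if_neg (by exact_mod_cast hpm)]
      simp only [true_iff]
      intro j hj hjm
      have := Nat.pow_le_pow_right (by omega : 1 ≤ 10) hj
      omega

lemma leftCut_alt_eq (n : Int) (h : ¬ n < 10) :
    (leftCut_alt n = true) ↔ Qprop n.toNat := by
  set m := n.toNat with hm
  have hnn : (m : Int) = n := Int.toNat_of_nonneg (by omega)
  have hm10 : 10 ≤ m := by omega
  rw [leftCut_alt, if_neg h]
  have h10 : (10 : Int) = ((10 ^ 1 : Nat) : Int) := by norm_num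
  rw [← hnn, h10]
  rw [Int.toNat_natCast]
  rw [loopB_spec m 1 m (le_refl 1) (by
    have h1 : m < 10 ^ m := Nat.lt_pow_self (by omega)
    have h2 : (10:Nat) ^ m ≤ 10 ^ (1 + m) := Nat.pow_le_pow_right (by omega) (by omega)
    omega)]
  unfold Qprop
  rfl

-- ===== VERDICT (by name: the statement is the Claim_ definition above) =====
theorem leftCut_spec : Claim_equal_leftCut := by
  intro n _
  unfold Spec_leftCut
  by_cases h : n < 10
  · simp [leftCut, leftCut_alt, h]
  · have h1 := leftCut_eq n h
    have h2 := leftCut_alt_eq n h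
    cases hA : leftCut n <;> cases hB : leftCut_alt n <;> simp_all
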